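-- pv_equiv track=rewrite | github.com/pixelatedbus/BCP-Tubes-IF2224 | src/rule_reader.py | expand_char_range
-- ===== SOURCE A (Python) =====
-- def expand_char_range(char_range: str) -> list[str]:
--     list_chars: list[str] = []
--     i = 0
--     while i < len(char_range):
--         if i + 2 < len(char_range) and char_range[i + 1] == '-':
--             start_char, end_char = char_range[i], char_range[i + 2]
--
--             list_chars.extend([chr(c) for c in range(ord(start_char), ord(end_char) + 1)])
--
--             i += 3
--         else:
--             list_chars.append(char_range[i])
--             i += 1
--
--     return list_chars
-- ===== SOURCE B (Python) =====
-- def expand_char_range(char_range: str) -> list[str]: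
--     # Treat the input as a stack of characters (top = leftmost char): pop one
--     # char; if the next two on the stack are '-' and some end char, pop them
--     # too and expand the inclusive range; otherwise emit the popped char.
--     stack = list(reversed(char_range))
--     out: list[str] = []
--     while stack:
--         c = stack.pop()
--         if len(stack) >= 2 and stack[-1] == '-':
--             stack.pop()
--             d = stack.pop()
--             out.extend(chr(k) for k in range(ord(c), ord(d) + 1))
--         else:
--             out.append(c)
--     return out
-- ===== Notes on version B (the rewrite author's own statement) =====
-- stated objective: alternative
-- what changed: Replaces the index-arithmetic while loop (i, i+1, i+2 bounds checks) with a stack of characters that is consumed by popping one or three items per step, so no index bookkeeping remains.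
import Mathlib
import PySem

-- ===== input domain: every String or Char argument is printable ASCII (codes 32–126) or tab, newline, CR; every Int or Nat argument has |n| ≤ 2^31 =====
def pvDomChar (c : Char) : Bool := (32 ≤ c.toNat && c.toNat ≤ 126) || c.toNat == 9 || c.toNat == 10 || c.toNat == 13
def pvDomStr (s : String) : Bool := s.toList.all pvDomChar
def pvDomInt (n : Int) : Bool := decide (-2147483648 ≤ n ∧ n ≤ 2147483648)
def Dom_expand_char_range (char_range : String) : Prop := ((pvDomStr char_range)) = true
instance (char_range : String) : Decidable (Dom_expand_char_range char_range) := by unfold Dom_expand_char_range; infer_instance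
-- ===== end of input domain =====

-- B replaces A's index-arithmetic while loop with a character stack consumed by popping one or three items per step (alternative decomposition, same cost).


-- [chr(c) for c in range(ord(start), ord(end) + 1)] — identical expression in both Pythons
def pvRangeChars (a b : Char) : List String :=
  (List.range' a.toNat (b.toNat + 1 - a.toNat)).map (fun c => String.ofList [Char.ofNat c])

-- ===== PORT A =====
-- A's while loop over index i; the two `i += 1` arms are Python's single else,
-- reached when either conjunct of the short-circuit guard fails.
def pvALoop (cs : List Char) (i : Nat) (acc : List String) : List String :=
  if h : i < cs.length then
    if h2 : i + 2 < cs.length then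
      if cs[i+1] = '-' then
        pvALoop cs (i+3) (acc ++ pvRangeChars cs[i] cs[i+2])
      else
        pvALoop cs (i+1) (acc ++ [String.ofList [cs[i]]])
    else
      pvALoop cs (i+1) (acc ++ [String.ofList [cs[i]]])
  else acc
termination_by cs.length - i

def expand_char_range (char_range : String) : List String :=
  pvALoop char_range.toList 0 []

-- ===== PORT B =====
-- Source B's stack loop: top of the stack is the head of the list.
def pvBLoop : List Char → List String → List String
  | [], out => out
  | c :: st, out =>
    match st with
    | d1 :: d2 :: st2 =>
      if d1 = '-' then pvBLoop st2 (out ++ pvRangeChars c d2)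
      else pvBLoop (d1 :: d2 :: st2) (out ++ [String.ofList [c]])
    | st' => pvBLoop st' (out ++ [String.ofList [c]])

def expand_char_range_alt (char_range : String) : List String :=
  pvBLoop char_range.toList []

-- ===== PRECONDITION & SPEC =====
def Spec_expand_char_range (char_range : String) (out : List String) : Prop := out = expand_char_range_alt char_range
instance (char_range : String) (out : List String) : Decidable (Spec_expand_char_range char_range out) := by unfold Spec_expand_char_range; infer_instance

-- ===== CLAIM (what is proved, stated in full; the proofs are below) =====
def Claim_equal_expand_char_range : Prop := ∀ (char_range : String), Dom_expand_char_range char_range → Spec_expand_char_range char_range (expand_char_range char_range)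

-- ===== LEMMAS AND PROOFS =====

theorem pvALoop_eq_pvBLoop (cs : List Char) (i : Nat) (acc : List String) :
    pvALoop cs i acc = pvBLoop (cs.drop i) acc := by
  induction i, acc using pvALoop.induct cs with
  | case1 i acc h h2 hd ih =>
    rw [pvALoop]
    simp only [h, h2, hd, dif_pos, if_pos]
    rw [List.drop_eq_getElem_cons h, List.drop_eq_getElem_cons (show i+1 < cs.length by omega),
        List.drop_eq_getElem_cons h2, hd, pvBLoop]
    simpa using ih
  | case2 i acc h h2 hd ih =>
    rw [pvALoop]
    simp only [h, h2, dif_pos, hd]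
    rw [List.drop_eq_getElem_cons h, List.drop_eq_getElem_cons (show i+1 < cs.length by omega),
        List.drop_eq_getElem_cons h2, pvBLoop]
    simp only [hd, if_neg, not_false_iff]
    rw [ih, List.drop_eq_getElem_cons (show i+1 < cs.length by omega),
        List.drop_eq_getElem_cons h2]
  | case3 i acc h h2 ih =>
    rw [pvALoop, dif_pos h, dif_neg h2, ih, List.drop_eq_getElem_cons h]
    have hlen : (cs.drop (i+1)).length ≤ 1 := by
      simp [List.length_drop]; omega
    cases hst : cs.drop (i+1) with
    | nil => simp [pvBLoop]
    | cons x t =>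
      cases t with
      | nil => simp [pvBLoop]
      | cons y t2 => rw [hst] at hlen; simp at hlen
  | case4 i acc h =>
    rw [pvALoop]
    simp only [h, dif_neg, not_false_iff]
    rw [List.drop_eq_nil_of_le (by omega), pvBLoop]

-- ===== VERDICT (by name: the statement is the Claim_ definition above) =====
theorem expand_char_range_spec : Claim_equal_expand_char_range := by
  intro s _
  unfold Spec_expand_char_range expand_char_range expand_char_range_alt
  simpa using pvALoop_eq_pvBLoop s.toList 0 []
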